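-- pv_equiv track=rewrite | github.com/thinkeloquent/mta-v600 | packages_py/cache_response/src/cache_response/parser.py | extract_vary_headers
-- ===== SOURCE A (Python) =====
-- from typing import Dict, List, Optional, Tuple
--
-- def extract_vary_headers(
--     headers: Dict[str, str], vary: List[str]
-- ) -> Dict[str, str]:
--     """Extract headers needed for Vary matching."""
--     result: Dict[str, str] = {}
--
--     for key in vary:
--         if key == "*":
--             continue
--         lower_key = key.lower()
--         for k, v in headers.items():
--             if k.lower() == lower_key:
--                 result[lower_key] = v
--                 break
--
--     return result
-- ===== SOURCE B (Python) =====
-- def extract_vary_headers(headers, vary):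
--     """Extract headers needed for Vary matching."""
--     # Invert the loop structure: record each wanted name's first position in
--     # vary, make ONE pass over headers keeping the first match per name, then
--     # sort the matches back into vary order.
--     pos = {}
--     for i, key in enumerate(vary):
--         lk = key.lower()
--         if key != "*" and lk not in pos:
--             pos[lk] = i
--     matched = {}
--     for k, v in headers.items():
--         lk = k.lower()
--         if lk in pos and lk not in matched:
--             matched[lk] = v
--     # every key of matched is a key of pos, so pos[lk] never raises
--     return dict(sorted(matched.items(), key=lambda kv: pos[kv[0]]))
-- ===== Notes on version B (the rewrite author's own statement) =====
-- stated objective: faster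
-- what changed: Inverts the loop structure: instead of scanning all headers once per vary name, B records each wanted name's first position in vary, makes a single pass over headers keeping the first case-insensitive match per name, and finally sorts the matches back into vary order.
import Mathlib
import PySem

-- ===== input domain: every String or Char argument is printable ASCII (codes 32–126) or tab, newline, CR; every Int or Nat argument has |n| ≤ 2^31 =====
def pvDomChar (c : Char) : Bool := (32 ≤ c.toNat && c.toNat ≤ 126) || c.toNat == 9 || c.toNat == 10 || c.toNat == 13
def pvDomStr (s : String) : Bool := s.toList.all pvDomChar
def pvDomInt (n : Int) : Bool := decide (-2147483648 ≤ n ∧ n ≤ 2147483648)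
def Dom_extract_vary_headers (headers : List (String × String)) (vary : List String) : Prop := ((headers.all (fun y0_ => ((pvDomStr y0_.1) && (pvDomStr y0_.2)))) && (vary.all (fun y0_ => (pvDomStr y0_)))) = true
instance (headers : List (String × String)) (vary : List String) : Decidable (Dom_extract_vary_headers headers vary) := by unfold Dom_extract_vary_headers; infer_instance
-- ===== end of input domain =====

-- B inverts A's loop structure: one pass over vary records first positions, one pass over
-- headers keeps the first case-insensitive match per wanted name, and a final sort puts the
-- matches back into vary order; A instead rescans all headers for every vary name.

-- ===== PORT A =====
-- A's inner loop: 'for k, v in headers.items(): if k.lower() == lower_key: … break'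
def pvScanA (headers : List (String × String)) (lk : String) : Option String :=
  match headers with
  | [] => none
  | (k, v) :: rest => if PySem.Str.lower k == lk then some v else pvScanA rest lk

def extract_vary_headers (headers : List (String × String)) (vary : List String) : List (String × String) :=
  (vary.foldl (fun (result : PySem.Dict String String) key =>
      if key == "*" then result
      else
        match pvScanA headers (PySem.Str.lower key) with
        | some v => result.insert (PySem.Str.lower key) v
        | none => result)
    PySem.Dict.empty).items

-- ===== PORT B =====
def extract_vary_headers_alt (headers : List (String × String)) (vary : List String) : List (String × String) :=
  let pos := (PySem.List.enumerate vary 0).foldl (fun (d : PySem.Dict String Int) p =>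
      if p.2 != "*" && !(d.contains (PySem.Str.lower p.2)) then d.insert (PySem.Str.lower p.2) p.1 else d)
    PySem.Dict.empty
  let matched := headers.foldl (fun (d : PySem.Dict String String) p =>
      if pos.contains (PySem.Str.lower p.1) && !(d.contains (PySem.Str.lower p.1)) then d.insert (PySem.Str.lower p.1) p.2 else d)
    PySem.Dict.empty
  -- 'pos[kv[0]]' in the sort key never raises (matched's keys ⊆ pos's keys), so getD is exact here
  (PySem.Dict.ofList (PySem.List.sorted matched.items (fun kv => pos.getD kv.1 0))).items

-- ===== PRECONDITION & SPEC =====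
def Spec_extract_vary_headers (headers : List (String × String)) (vary : List String) (out : List (String × String)) : Prop := out = extract_vary_headers_alt headers vary
instance (headers : List (String × String)) (vary : List String) (out : List (String × String)) : Decidable (Spec_extract_vary_headers headers vary out) := by unfold Spec_extract_vary_headers; infer_instance

-- ===== CLAIM (what is proved, stated in full; the proofs are below) =====
def Claim_equal_extract_vary_headers : Prop := ∀ (headers : List (String × String)) (vary : List String), Dom_extract_vary_headers headers vary → Spec_extract_vary_headers headers vary (extract_vary_headers headers vary)

-- ===== LEMMAS AND PROOFS =====

-- the distinct lowered non-'*' vary names, in order of first occurrence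
def pvGoodKeys (vary : List String) : List String :=
  PySem.List.dedup ((vary.filter (fun k => k != "*")).map PySem.Str.lower)

-- the list A's result dict holds: each good key paired with its first header match, vary order
def pvAL (headers : List (String × String)) (vary : List String) : List (String × String) :=
  (pvGoodKeys vary).filterMap (fun lk => (pvScanA headers lk).map (fun v => (lk, v)))

theorem pv_goodKeys_nodup (vary : List String) : (pvGoodKeys vary).Nodup := by
  rw [pvGoodKeys, PySem.List.dedup_eq_ofList]
  exact PySem.Set.nodup_ofList _

theorem pv_mem_AL (headers : List (String × String)) (vary : List String) (p : String × String) :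
    p ∈ pvAL headers vary ↔ p.1 ∈ pvGoodKeys vary ∧ pvScanA headers p.1 = some p.2 := by
  constructor
  · intro h
    simp only [pvAL, List.mem_filterMap] at h
    obtain ⟨a, ha, hf⟩ := h
    cases hs : pvScanA headers a with
    | none => rw [hs] at hf; simp at hf
    | some v =>
      rw [hs] at hf
      simp only [Option.map_some, Option.some.injEq] at hf
      subst hf
      exact ⟨ha, hs⟩
  · intro ⟨h1, h2⟩
    simp only [pvAL, List.mem_filterMap]
    exact ⟨p.1, h1, by rw [h2]; rfl⟩

theorem pv_goodKeys_append (l : List String) (k : String) :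
    pvGoodKeys (l ++ [k]) = if k == "*" then pvGoodKeys l
      else PySem.Set.add (pvGoodKeys l) (PySem.Str.lower k) := by
  simp only [pvGoodKeys, List.filter_append, List.map_append, PySem.List.dedup_eq_ofList]
  by_cases hk : (k == "*") = true
  · have hb : (k != "*") = false := by simpa [bne] using hk
    simp [hk, hb]
  · have hb : (k != "*") = true := by simpa [bne] using hk
    simp [hk, hb, PySem.Set.ofList_append_singleton]

theorem pv_A_char (headers : List (String × String)) (vary : List String) :
    extract_vary_headers headers vary = pvAL headers vary := by
  induction vary using List.reverseRecOn with
  | nil => rfl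
  | append_singleton l k ih =>
    simp only [extract_vary_headers, List.foldl_append, List.foldl_cons, List.foldl_nil] at *
    by_cases hk : (k == "*") = true
    · rw [if_pos hk, ih]
      simp only [pvAL, pv_goodKeys_append, hk, if_true]
    · rw [if_neg hk]
      simp only [pvAL, pv_goodKeys_append, hk, Bool.false_eq_true, if_false]
      by_cases hmem : PySem.Str.lower k ∈ pvGoodKeys l
      · rw [PySem.Set.add_of_mem hmem]
        cases hs : pvScanA headers (PySem.Str.lower k) with
        | none => exact ih
        | some v =>
          show ((List.foldl _ PySem.Dict.empty l).insert (PySem.Str.lower k) v).items = _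
          have hpm : ((PySem.Str.lower k), v) ∈ pvAL headers l :=
            (pv_mem_AL headers l _).mpr ⟨hmem, hs⟩
          have hcon : (List.foldl (fun (result : PySem.Dict String String) key =>
              if key == "*" then result
              else
                match pvScanA headers (PySem.Str.lower key) with
                | some v => result.insert (PySem.Str.lower key) v
                | none => result) PySem.Dict.empty l).contains (PySem.Str.lower k) = true := by
            simp only [PySem.Dict.contains, ih, List.any_eq_true]
            exact ⟨_, hpm, by simp⟩
          rw [PySem.Dict.items_insert_of_contains _ _ hcon, ih]
          have : ∀ p ∈ pvAL headers l,
              (if (p.1 == PySem.Str.lower k) = true then (PySem.Str.lower k, v) else p) = p := by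
            intro p hp
            by_cases hpk : (p.1 == PySem.Str.lower k) = true
            · rw [if_pos hpk]
              have h1 := ((pv_mem_AL headers l p).mp hp).2
              have hk1 : p.1 = PySem.Str.lower k := by simpa using hpk
              rw [hk1, hs] at h1
              have hv : v = p.2 := by simpa using h1
              rw [← hk1, hv]
            · rw [if_neg hpk]
          rw [List.map_congr_left this]
          show List.map id (pvAL headers l) = _
          rw [List.map_id]
          rfl
      · rw [PySem.Set.add_of_not_mem hmem, List.filterMap_append]
        cases hs : pvScanA headers (PySem.Str.lower k) with
        | none => simpa [List.filterMap, hs] using ih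
        | some v =>
          show ((List.foldl _ PySem.Dict.empty l).insert (PySem.Str.lower k) v).items = _
          have hcon : (List.foldl (fun (result : PySem.Dict String String) key =>
              if key == "*" then result
              else
                match pvScanA headers (PySem.Str.lower key) with
                | some v => result.insert (PySem.Str.lower key) v
                | none => result) PySem.Dict.empty l).contains (PySem.Str.lower k) = false := by
            simp only [PySem.Dict.contains, ih, List.any_eq_false]
            intro p hp
            have := ((pv_mem_AL headers l p).mp hp).1
            simp only [beq_iff_eq]
            intro hpe
            exact hmem (hpe ▸ this)
          rw [PySem.Dict.items_insert_of_not_contains _ _ hcon, ih]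
          simp [pvAL, List.filterMap, hs]

-- the pos pass: keys are exactly pvGoodKeys (in vary order), values strictly increase
theorem pv_pos_inv (vary : List String) :
    ((PySem.List.enumerate vary 0).foldl (fun (d : PySem.Dict String Int) p =>
        if p.2 != "*" && !(d.contains (PySem.Str.lower p.2)) then d.insert (PySem.Str.lower p.2) p.1 else d)
      PySem.Dict.empty).keys = pvGoodKeys vary
    ∧ ((PySem.List.enumerate vary 0).foldl (fun (d : PySem.Dict String Int) p =>
        if p.2 != "*" && !(d.contains (PySem.Str.lower p.2)) then d.insert (PySem.Str.lower p.2) p.1 else d)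
      PySem.Dict.empty).items.Pairwise (fun p q => p.2 < q.2)
    ∧ ∀ p ∈ ((PySem.List.enumerate vary 0).foldl (fun (d : PySem.Dict String Int) p =>
        if p.2 != "*" && !(d.contains (PySem.Str.lower p.2)) then d.insert (PySem.Str.lower p.2) p.1 else d)
      PySem.Dict.empty).items, p.2 < (vary.length : Int) := by
  induction vary using List.reverseRecOn with
  | nil => exact ⟨rfl, List.Pairwise.nil, by intro p hp; simp [PySem.Dict.empty] at hp⟩
  | append_singleton l k ih =>
    obtain ⟨ihk, ihp, ihb⟩ := ih
    rw [PySem.List.enumerate_append]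
    simp only [PySem.List.enumerate_cons, PySem.List.enumerate_nil, List.foldl_append,
      List.foldl_cons, List.foldl_nil]
    rw [pv_goodKeys_append]
    set d := ((PySem.List.enumerate l 0).foldl (fun (d : PySem.Dict String Int) p =>
        if p.2 != "*" && !(d.contains (PySem.Str.lower p.2)) then d.insert (PySem.Str.lower p.2) p.1 else d)
      PySem.Dict.empty) with hd
    by_cases hg : (k != "*" && !(d.contains (PySem.Str.lower k))) = true
    · have hg2 : (k != "*") = true ∧ (!(d.contains (PySem.Str.lower k))) = true := by
        simpa using hg
      have hne : (k == "*") = false := by simpa [bne] using hg2.1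
      have hcon : d.contains (PySem.Str.lower k) = false := by simpa using hg2.2
      have hnm : PySem.Str.lower k ∉ pvGoodKeys l := by
        rw [← ihk]
        intro hmem
        rw [(PySem.Dict.contains_iff_mem_keys d _).mpr hmem] at hcon
        simp at hcon
      rw [if_pos hg, hne]
      simp only [Bool.false_eq_true, if_false]
      refine ⟨?_, ?_, ?_⟩
      · rw [PySem.Dict.keys_insert_of_not_contains _ _ hcon, ihk, PySem.Set.add_of_not_mem hnm]
      · rw [PySem.Dict.items_insert_of_not_contains _ _ hcon]
        rw [List.pairwise_append]
        refine ⟨ihp, List.pairwise_singleton _ _, ?_⟩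
        intro p hp q hq
        simp only [List.mem_singleton] at hq
        subst hq
        simpa using ihb p hp
      · rw [PySem.Dict.items_insert_of_not_contains _ _ hcon]
        intro p hp
        rcases List.mem_append.mp hp with h | h
        · have := ihb p h
          simp only [List.length_append, List.length_singleton]
          push_cast
          omega
        · simp only [List.mem_singleton] at h
          subst h
          simp only [List.length_append, List.length_singleton]
          push_cast
          omega
    · rw [if_neg hg]
      have hgk : (if (k == "*") = true then pvGoodKeys l
          else PySem.Set.add (pvGoodKeys l) (PySem.Str.lower k)) = pvGoodKeys l := by
        by_cases hke : (k == "*") = true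
        · rw [if_pos hke]
        · rw [if_neg hke]
          have hcon : d.contains (PySem.Str.lower k) = true := by
            by_contra hc
            apply hg
            have h1 : (k != "*") = true := by simpa [bne] using hke
            have h2 : (!(d.contains (PySem.Str.lower k))) = true := by
              simpa using hc
            simp [h1, h2]
          have : PySem.Str.lower k ∈ pvGoodKeys l := by
            rw [← ihk]
            exact (PySem.Dict.contains_iff_mem_keys d _).mp hcon
          exact PySem.Set.add_of_mem this
      rw [hgk]
      refine ⟨ihk, ihp, ?_⟩
      intro p hp
      have := ihb p hp
      simp only [List.length_append, List.length_singleton]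
      push_cast
      omega

theorem pv_matched_get?_aux (headers : List (String × String)) (pos : PySem.Dict String Int) (lk : String) :
    ∀ d : PySem.Dict String String,
      (headers.foldl (fun (d : PySem.Dict String String) p =>
          if pos.contains (PySem.Str.lower p.1) && !(d.contains (PySem.Str.lower p.1)) then d.insert (PySem.Str.lower p.1) p.2 else d)
        d).get? lk
      = if pos.contains lk = true then
          (match d.get? lk with
           | some w => some w
           | none => pvScanA headers lk)
        else d.get? lk := by
  induction headers with
  | nil =>
    intro d
    simp only [List.foldl_nil]
    by_cases hp : pos.contains lk = true
    · rw [if_pos hp]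
      cases hd : d.get? lk <;> simp [pvScanA]
    · rw [if_neg hp]
  | cons p rest ih =>
    intro d
    obtain ⟨k, v⟩ := p
    rw [List.foldl_cons, ih _]
    by_cases hp : pos.contains lk = true
    · rw [if_pos hp, if_pos hp]
      by_cases hkl : PySem.Str.lower k = lk
      · subst hkl
        cases hd : d.get? (PySem.Str.lower k) with
        | some w =>
          have hc : d.contains (PySem.Str.lower k) = true := by
            rw [PySem.Dict.contains_eq_isSome_get?, hd]; rfl
          simp only [hc, Bool.not_true, Bool.and_false, Bool.false_eq_true, if_false, hd]
        | none =>
          have hc : d.contains (PySem.Str.lower k) = false := by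
            rw [PySem.Dict.contains_eq_isSome_get?, hd]; rfl
          simp only [hp, hc, Bool.not_false, Bool.and_true, if_true]
          rw [PySem.Dict.get?_insert_self]
          simp [pvScanA]
      · have hget : (if (pos.contains (PySem.Str.lower k) && !(d.contains (PySem.Str.lower k))) = true
            then d.insert (PySem.Str.lower k) v else d).get? lk = d.get? lk := by
          split
          · exact PySem.Dict.get?_insert_of_ne _ _ (fun h => hkl h.symm)
          · rfl
        rw [hget]
        cases hd : d.get? lk with
        | some w => simp
        | none =>
          have hbe : (PySem.Str.lower k == lk) = false := beq_eq_false_iff_ne.mpr hkl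
          simp only [pvScanA, hbe, Bool.false_eq_true, if_false]
    · rw [if_neg hp, if_neg hp]
      split
      · rename_i hguard
        have hkl : PySem.Str.lower k ≠ lk := by
          intro h
          have h1 : pos.contains (PySem.Str.lower k) = true := by
            have := hguard
            simp at this
            exact this.1
          rw [h] at h1
          exact hp h1
        exact PySem.Dict.get?_insert_of_ne _ _ (fun h => hkl h.symm)
      · rfl

theorem pv_matched_get? (headers : List (String × String)) (pos : PySem.Dict String Int) (lk : String) :
    (headers.foldl (fun (d : PySem.Dict String String) p =>
        if pos.contains (PySem.Str.lower p.1) && !(d.contains (PySem.Str.lower p.1)) then d.insert (PySem.Str.lower p.1) p.2 else d)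
      PySem.Dict.empty).get? lk
      = if pos.contains lk = true then pvScanA headers lk else none := by
  rw [pv_matched_get?_aux headers pos lk PySem.Dict.empty]
  by_cases hp : pos.contains lk = true
  · rw [if_pos hp, if_pos hp, PySem.Dict.get?_empty]
  · rw [if_neg hp, if_neg hp, PySem.Dict.get?_empty]

theorem pv_matched_nodup (headers : List (String × String)) (pos : PySem.Dict String Int) :
    (headers.foldl (fun (d : PySem.Dict String String) p =>
        if pos.contains (PySem.Str.lower p.1) && !(d.contains (PySem.Str.lower p.1)) then d.insert (PySem.Str.lower p.1) p.2 else d)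
      PySem.Dict.empty).keys.Nodup := by
  have aux : ∀ (hs : List (String × String)) (d : PySem.Dict String String), d.keys.Nodup →
      (hs.foldl (fun (d : PySem.Dict String String) p =>
          if pos.contains (PySem.Str.lower p.1) && !(d.contains (PySem.Str.lower p.1)) then d.insert (PySem.Str.lower p.1) p.2 else d)
        d).keys.Nodup := by
    intro hs
    induction hs with
    | nil => intro d hd; simpa using hd
    | cons p rest ih =>
      intro d hd
      rw [List.foldl_cons]
      apply ih
      split
      · exact PySem.Dict.nodup_keys_insert _ _ _ hd
      · exact hd
  exact aux headers PySem.Dict.empty (by simp [PySem.Dict.empty, PySem.Dict.keys])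

theorem pv_AL_map_fst (headers : List (String × String)) (gk : List String) :
    (gk.filterMap (fun lk => (pvScanA headers lk).map (fun v => (lk, v)))).map (fun p => p.1)
      = gk.filter (fun lk => (pvScanA headers lk).isSome) := by
  induction gk with
  | nil => rfl
  | cons a rest ih =>
    cases hs : pvScanA headers a with
    | none => simp [List.filter_cons, hs, ih]
    | some v => simp [List.filter_cons, hs, ih]

theorem pv_foldl_insert_items {ν : Type} :
    ∀ (l : List (String × ν)) (d : PySem.Dict String ν), d.keys.Nodup →
      (∀ x ∈ l.map (fun p => p.1), x ∉ d.keys) → (l.map (fun p => p.1)).Nodup →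
      (l.foldl (fun (acc : PySem.Dict String ν) p => acc.insert p.1 p.2) d).items = d.items ++ l := by
  intro l
  induction l with
  | nil => intro d _ _ _; simp
  | cons p rest ih =>
    intro d hnd hnm hln
    rw [List.foldl_cons]
    have hcon : d.contains p.1 = false := by
      by_contra hc
      have : d.contains p.1 = true := by simpa using hc
      exact hnm p.1 (by simp) ((PySem.Dict.contains_iff_mem_keys d _).mp this)
    have hkeys : (d.insert p.1 p.2).keys = d.keys ++ [p.1] :=
      PySem.Dict.keys_insert_of_not_contains _ _ hcon
    simp only [List.map_cons, List.nodup_cons] at hln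
    have := ih (d.insert p.1 p.2)
      (by rw [hkeys]
          apply List.Nodup.append hnd (List.nodup_singleton _)
          intro x hx hy
          simp only [List.mem_singleton] at hy
          subst hy
          exact hnm p.1 (by simp) hx)
      (by intro x hx
          rw [hkeys]
          intro hmem
          rcases List.mem_append.mp hmem with h | h
          · exact hnm x (by simp [hx]) h
          · simp only [List.mem_singleton] at h
            subst h
            exact hln.1 hx)
      hln.2
    rw [this, PySem.Dict.items_insert_of_not_contains _ _ hcon, List.append_assoc]
    rfl

theorem pv_ofList_items {ν : Type} (l : List (String × ν)) (h : (l.map (fun p => p.1)).Nodup) :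
    (PySem.Dict.ofList l).items = l := by
  have : PySem.Dict.ofList l = l.foldl (fun (acc : PySem.Dict String ν) p => acc.insert p.1 p.2) PySem.Dict.empty := rfl
  rw [this, pv_foldl_insert_items l PySem.Dict.empty (by simp [PySem.Dict.empty, PySem.Dict.keys])
    (by intro x _; simp [PySem.Dict.empty, PySem.Dict.keys]) h]
  rfl

-- the whole B pipeline, for any pos with the two proved properties
theorem pv_B_aux (headers : List (String × String)) (vary : List String) (pos : PySem.Dict String Int)
    (hkeys : pos.keys = pvGoodKeys vary) (hpw : pos.items.Pairwise (fun p q => p.2 < q.2)) :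
    (PySem.Dict.ofList (PySem.List.sorted
        (headers.foldl (fun (d : PySem.Dict String String) p =>
            if pos.contains (PySem.Str.lower p.1) && !(d.contains (PySem.Str.lower p.1)) then d.insert (PySem.Str.lower p.1) p.2 else d)
          PySem.Dict.empty).items
        (fun kv => pos.getD kv.1 0))).items = pvAL headers vary := by
  have hposnd : pos.keys.Nodup := by rw [hkeys]; exact pv_goodKeys_nodup vary
  have hmn := pv_matched_nodup headers pos
  have hALfst : ((pvAL headers vary).map (fun p => p.1)).Nodup := by
    rw [pvAL, pv_AL_map_fst]
    exact (pv_goodKeys_nodup vary).filter _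
  have hALnd : (pvAL headers vary).Nodup := List.Nodup.of_map _ hALfst
  have hMnd : ((headers.foldl (fun (d : PySem.Dict String String) p =>
      if pos.contains (PySem.Str.lower p.1) && !(d.contains (PySem.Str.lower p.1)) then d.insert (PySem.Str.lower p.1) p.2 else d)
    PySem.Dict.empty).items).Nodup := List.Nodup.of_map _ hmn
  have hperm : (pvAL headers vary).Perm
      ((headers.foldl (fun (d : PySem.Dict String String) p =>
          if pos.contains (PySem.Str.lower p.1) && !(d.contains (PySem.Str.lower p.1)) then d.insert (PySem.Str.lower p.1) p.2 else d)
        PySem.Dict.empty).items) := by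
    rw [List.perm_ext_iff_of_nodup hALnd hMnd]
    intro p
    rw [pv_mem_AL]
    rw [← PySem.Dict.get?_eq_some_iff_mem_items _ p.1 p.2 hmn]
    rw [pv_matched_get? headers pos p.1]
    constructor
    · intro ⟨h1, h2⟩
      have hc : pos.contains p.1 = true := (PySem.Dict.contains_iff_mem_keys pos _).mpr (hkeys ▸ h1)
      rw [if_pos hc]
      exact h2
    · intro h
      by_cases hc : pos.contains p.1 = true
      · rw [if_pos hc] at h
        exact ⟨hkeys ▸ (PySem.Dict.contains_iff_mem_keys pos _).mp hc, h⟩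
      · rw [if_neg hc] at h
        exact absurd h (by simp)
  have hgkpw : (pvGoodKeys vary).Pairwise (fun x y => pos.getD x 0 < pos.getD y 0) := by
    rw [← hkeys, PySem.Dict.keys, List.pairwise_map]
    apply List.Pairwise.imp_of_mem (R := fun p q => p.2 < q.2) _ hpw
    intro a b ha hb hab
    rw [PySem.Dict.getD_of_mem_items pos (by exact ha) hposnd 0,
        PySem.Dict.getD_of_mem_items pos (by exact hb) hposnd 0]
    exact hab
  have hALpw : (pvAL headers vary).Pairwise (fun a b => pos.getD a.1 0 < pos.getD b.1 0) := by
    rw [pvAL, List.pairwise_filterMap]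
    apply List.Pairwise.imp _ hgkpw
    intro a b hab p hp q hq
    cases hsa : pvScanA headers a with
    | none => rw [hsa] at hp; simp at hp
    | some va =>
      rw [hsa] at hp
      simp only [Option.map_some, Option.some.injEq] at hp
      cases hsb : pvScanA headers b with
      | none => rw [hsb] at hq; simp at hq
      | some vb =>
        rw [hsb] at hq
        simp only [Option.map_some, Option.some.injEq] at hq
        rw [← hp, ← hq]
        exact hab
  rw [PySem.List.sorted_eq_of_perm_of_pairwise_lt _ _ _ hperm hALpw]
  exact pv_ofList_items _ hALfst

-- ===== VERDICT (by name: the statement is the Claim_ definition above) =====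
theorem extract_vary_headers_spec : Claim_equal_extract_vary_headers := by
  intro headers vary _
  show extract_vary_headers headers vary = extract_vary_headers_alt headers vary
  rw [pv_A_char]
  obtain ⟨hkeys, hpw, -⟩ := pv_pos_inv vary
  exact (pv_B_aux headers vary _ hkeys hpw).symm
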